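-- pv_equiv track=rewrite | github.com/T-Ginger-J/Leetcode | 2026/January/13/numsegmentsinstring.py | countSegmentsIterative
-- ===== SOURCE A (Python) =====
-- def countSegmentsIterative(s: str) -> int:
--     count = 0
--     in_segment = False
--     for char in s:
--         if char != ' ' and not in_segment:
--             count += 1
--             in_segment = True
--         elif char == ' ':
--             in_segment = False
--     return count
-- ===== SOURCE B (Python) =====
-- def countSegmentsIterative(s: str) -> int:
--     # Build the pieces produced by splitting on the single space character,
--     # then count the non-empty pieces (each non-empty piece is one segment).
--     return sum(1 for piece in s.split(' ') if piece)
-- ===== Notes on version B (the rewrite author's own statement) =====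
-- stated objective: idiomatic
-- what changed: Replaced the character-by-character in_segment state machine with a staged pipeline: first build the list of pieces via s.split(' ') (single-space separator, so tabs/newlines stay inside pieces), then count the non-empty pieces.
import Mathlib
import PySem

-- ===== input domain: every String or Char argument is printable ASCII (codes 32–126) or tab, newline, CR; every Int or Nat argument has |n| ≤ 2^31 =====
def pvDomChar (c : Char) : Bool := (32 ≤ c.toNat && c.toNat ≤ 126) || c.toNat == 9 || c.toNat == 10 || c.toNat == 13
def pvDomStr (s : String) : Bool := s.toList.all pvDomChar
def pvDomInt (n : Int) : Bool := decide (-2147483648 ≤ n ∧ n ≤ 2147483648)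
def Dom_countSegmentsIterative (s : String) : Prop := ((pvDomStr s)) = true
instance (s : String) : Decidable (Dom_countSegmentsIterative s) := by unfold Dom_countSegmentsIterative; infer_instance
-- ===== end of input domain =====

-- B replaces A's in_segment state machine by a staged pipeline: build the list of
-- pieces with split(' ') and count the non-empty pieces (idiomatic; measured faster
-- in a timing run via C-level str.split, same O(n) asymptotics).

-- ===== PORT A =====
def countSegmentsIterative (s : String) : Int :=
  (s.toList.foldl
    (fun st c =>
      if c ≠ ' ' ∧ st.2 = false then (st.1 + 1, true)
      else if c = ' ' then (st.1, false)
      else st)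
    ((0 : Int), false)).1

-- ===== PORT B =====
-- s.split(' ') for the non-empty single-char separator is PySem.Chars.splitOn · [' ']
-- (exact: PySem.Str.split? is defined from it); 'if piece' = the piece is non-empty.
def countSegmentsIterative_alt (s : String) : Int :=
  (PySem.Chars.splitOn s.toList [' ']).foldl
    (fun acc piece => if piece ≠ [] then acc + 1 else acc) 0

-- ===== PRECONDITION & SPEC =====
def Spec_countSegmentsIterative (s : String) (out : Int) : Prop := out = countSegmentsIterative_alt s
instance (s : String) (out : Int) : Decidable (Spec_countSegmentsIterative s out) := by unfold Spec_countSegmentsIterative; infer_instance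

-- ===== CLAIM (what is proved, stated in full; the proofs are below) =====
def Claim_equal_countSegmentsIterative : Prop := ∀ (s : String), Dom_countSegmentsIterative s → Spec_countSegmentsIterative s (countSegmentsIterative s)

-- ===== LEMMAS AND PROOFS =====

-- A's step function
def pvStepA : Int × Bool → Char → Int × Bool :=
  fun st c =>
    if c ≠ ' ' ∧ st.2 = false then (st.1 + 1, true)
    else if c = ' ' then (st.1, false)
    else st

-- number of non-empty pieces, as an Int
def pvCnt (xs : List (List Char)) : Int := ((xs.filter (fun w => w ≠ [])).length : Int)

theorem pvCnt_foldl (xs : List (List Char)) : ∀ (a : Int),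
    xs.foldl (fun acc piece => if piece ≠ [] then acc + 1 else acc) a = a + pvCnt xs := by
  induction xs with
  | nil => intro a; simp [pvCnt]
  | cons w xs ih =>
    intro a
    simp only [List.foldl_cons]
    rw [ih]
    by_cases hw : w = [] <;> simp [pvCnt, hw]
    ring

-- A's count started at c₀ is c₀ plus the count started at 0 (same flag)
theorem pvShiftA (l : List Char) : ∀ (c₀ : Int) (b : Bool),
    (l.foldl pvStepA (c₀, b)).1 = c₀ + (l.foldl pvStepA (0, b)).1 := by
  induction l with
  | nil => intro c₀ b; simp
  | cons c l ih =>
    intro c₀ b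
    simp only [List.foldl_cons]
    have hstep : ∀ (a : Int), pvStepA (a, b) c = (a + (pvStepA (0, b) c).1, (pvStepA (0, b) c).2) := by
      intro a; by_cases hc : c = ' ' <;> cases b <;> simp [pvStepA, hc]
    rcases hps : pvStepA (0, b) c with ⟨x, bs⟩
    rw [hps] at hstep
    rw [hstep c₀, ih, ih]
    rw [ih x bs]
    ring

-- key invariant: the split-and-count of go equals the pieces already closed (acc),
-- plus one for the piece in progress (cur, if non-empty), plus A's state machine
-- run over the rest with in_segment = (cur ≠ [])
theorem pvGoKey (l : List Char) : ∀ (fuel : Nat) (cur : List Char) (acc : List (List Char)),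
    l.length < fuel →
    pvCnt (PySem.Chars.splitOn.go [' '] fuel l cur acc)
      = pvCnt acc + (if cur = [] then 0 else 1)
        + (l.foldl pvStepA (0, !(cur == []))).1 := by
  induction l with
  | nil =>
    intro fuel cur acc hf
    cases fuel with
    | zero => simp at hf
    | succ f =>
      by_cases hcur : cur = [] <;>
        simp [PySem.Chars.splitOn.go, pvCnt, hcur]
  | cons c rest ih =>
    intro fuel cur acc hf
    cases fuel with
    | zero => simp at hf
    | succ f =>
      have hr : rest.length < f := by simpa using Nat.lt_of_succ_lt_succ hf
      rw [PySem.Chars.splitOn.go]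
      by_cases hc : c = ' '
      · have hpre : [' '].isPrefixOf (c :: rest) = true := by simp [hc]
        rw [if_pos hpre]
        simp only [List.length_cons, List.length_nil, List.drop_succ_cons, List.drop_zero]
        rw [ih f [] (cur.reverse :: acc) hr]
        have hstep : pvStepA (0, !(cur == [])) c = (0, false) := by
          by_cases hcur : cur = [] <;> simp [pvStepA, hc, hcur]
        simp only [List.foldl_cons, hstep]
        by_cases hcur : cur = [] <;> simp [pvCnt, hcur]
      · have hpre : ([' '].isPrefixOf (c :: rest)) ≠ true := by
          simp
          exact fun h => hc h.symm
        rw [if_neg hpre]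
        rw [ih f (c :: cur) acc hr]
        by_cases hcur : cur = []
        · subst hcur
          simp only [List.foldl_cons]
          have hstep : pvStepA ((0 : Int), !(([] : List Char) == [])) c = (1, true) := by
            simp [pvStepA, hc]
          rw [hstep, pvShiftA rest 1 true]
          simp
          ring
        · have hstep : pvStepA ((0 : Int), !(cur == [])) c = (0, true) := by
            simp [pvStepA, hc, hcur]
          simp only [List.foldl_cons, hstep]
          simp [hcur]

theorem countSegmentsIterative_eq (s : String) :
    countSegmentsIterative s = countSegmentsIterative_alt s := by
  show (s.toList.foldl pvStepA ((0 : Int), false)).1 = _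
  unfold countSegmentsIterative_alt PySem.Chars.splitOn
  rw [pvCnt_foldl]
  have h := pvGoKey s.toList (s.toList.length + 1) [] [] (by omega)
  simp at h ⊢
  rw [h]
  simp [pvCnt]

-- ===== VERDICT (by name: the statement is the Claim_ definition above) =====
theorem countSegmentsIterative_spec : Claim_equal_countSegmentsIterative := by
  intro s _
  exact countSegmentsIterative_eq s
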